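-- pv_equiv track=rewrite | github.com/lee-winchester/LLM_reasoner | LLMParrots/LATS/parse_prompt.py | check_goal_state_satisfied
-- ===== SOURCE A (Python) =====
-- def check_goal_state_satisfied(current_state_status, goal_state_status):
--     for block, location in goal_state_status["Blocks on top of locations"].items():
--         if block in current_state_status["Blocks on top of locations"].keys():
--             if not current_state_status["Blocks on top of locations"][block] == location:
--                 return False
--         else:
--             return False
--     return True
-- ===== SOURCE B (Python) =====
-- def check_goal_state_satisfied(current_state_status, goal_state_status):
--     goal = goal_state_status["Blocks on top of locations"]
--     current = current_state_status.get("Blocks on top of locations", {})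
--     return {**current, **goal} == current
-- ===== Notes on version B (the rewrite author's own statement) =====
-- stated objective: alternative
-- what changed: Instead of looping over goal items with membership tests and early returns, B builds the merged dict {**current, **goal} and tests whether merging changed nothing (dict equality with current), which holds exactly when the goal mapping is a sub-mapping of the current one; B reads the current mapping with .get(..., {}).
import Mathlib
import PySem

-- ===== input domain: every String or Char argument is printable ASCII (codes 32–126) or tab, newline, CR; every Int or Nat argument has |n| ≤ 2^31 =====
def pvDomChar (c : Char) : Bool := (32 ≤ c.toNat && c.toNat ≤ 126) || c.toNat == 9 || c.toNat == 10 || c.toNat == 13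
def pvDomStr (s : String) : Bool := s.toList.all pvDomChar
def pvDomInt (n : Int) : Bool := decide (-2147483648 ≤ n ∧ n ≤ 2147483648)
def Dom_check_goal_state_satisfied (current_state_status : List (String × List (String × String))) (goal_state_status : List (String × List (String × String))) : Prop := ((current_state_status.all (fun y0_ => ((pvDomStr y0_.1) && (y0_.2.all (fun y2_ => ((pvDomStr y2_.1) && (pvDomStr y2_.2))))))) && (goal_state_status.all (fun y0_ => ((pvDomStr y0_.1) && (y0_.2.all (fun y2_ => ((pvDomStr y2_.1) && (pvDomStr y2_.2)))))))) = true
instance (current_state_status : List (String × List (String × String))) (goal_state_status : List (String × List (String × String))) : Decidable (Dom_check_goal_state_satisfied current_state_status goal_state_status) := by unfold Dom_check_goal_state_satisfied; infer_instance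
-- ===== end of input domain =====

-- B builds the merged dict {**current, **goal} and compares it with current (dict equality),
-- instead of A's per-item loop with membership tests and early returns; same cost, different algorithm.


-- ===== PORT A =====
-- A's loop over goal_state_status["Blocks on top of locations"].items()
def pvLoopA (cur : PySem.Dict String String) : List (String × String) → Bool
  | [] => true
  | (block, location) :: rest =>
    if cur.contains block then
      if ¬ (cur.get? block == some location) then false
      else pvLoopA cur rest
    else false

def check_goal_state_satisfied (current_state_status : List (String × List (String × String))) (goal_state_status : List (String × List (String × String))) : Bool :=
  pvLoopA
    (PySem.Dict.ofList ((PySem.Dict.ofList current_state_status).getD "Blocks on top of locations" []))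
    (PySem.Dict.ofList ((PySem.Dict.ofList goal_state_status).getD "Blocks on top of locations" [])).items

-- ===== PORT B =====
-- Python dict == ignores insertion order: d1 == d2 iff each is a sub-mapping of the other
def pyDictEq (d1 d2 : PySem.Dict String String) : Bool :=
  d1.items.all (fun p => d2.get? p.1 == some p.2) &&
  d2.items.all (fun p => d1.get? p.1 == some p.2)

def check_goal_state_satisfied_alt (current_state_status : List (String × List (String × String))) (goal_state_status : List (String × List (String × String))) : Bool :=
  let goal := PySem.Dict.ofList ((PySem.Dict.ofList goal_state_status).getD "Blocks on top of locations" [])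
  let current := PySem.Dict.ofList ((PySem.Dict.ofList current_state_status).getD "Blocks on top of locations" [])
  -- {**current, **goal}: start from current, insert goal's items in order
  pyDictEq (goal.items.foldl (fun d p => d.insert p.1 p.2) current) current

-- ===== PRECONDITION & SPEC =====
-- A raises KeyError when goal_state_status lacks the "Blocks on top of locations" key, and also when
-- current_state_status lacks it while the goal mapping is nonempty; Pre_ is exactly the complement.
def Pre_check_goal_state_satisfied (current_state_status : List (String × List (String × String))) (goal_state_status : List (String × List (String × String))) : Prop :=
  (PySem.Dict.ofList goal_state_status).contains "Blocks on top of locations" = true ∧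
  ((PySem.Dict.ofList current_state_status).contains "Blocks on top of locations" = true ∨
   (PySem.Dict.ofList goal_state_status).getD "Blocks on top of locations" [] = [])
instance (current_state_status : List (String × List (String × String))) (goal_state_status : List (String × List (String × String))) : Decidable (Pre_check_goal_state_satisfied current_state_status goal_state_status) := by unfold Pre_check_goal_state_satisfied; infer_instance

def pvWitness_check_goal_state_satisfied : (List (String × List (String × String))) × (List (String × List (String × String))) :=
  ([("Blocks on top of locations", [("A", "table")])], [("Blocks on top of locations", [("A", "table")])])

def Spec_check_goal_state_satisfied (current_state_status : List (String × List (String × String))) (goal_state_status : List (String × List (String × String))) (out : Bool) : Prop := out = check_goal_state_satisfied_alt current_state_status goal_state_status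
instance (current_state_status : List (String × List (String × String))) (goal_state_status : List (String × List (String × String))) (out : Bool) : Decidable (Spec_check_goal_state_satisfied current_state_status goal_state_status out) := by unfold Spec_check_goal_state_satisfied; infer_instance

-- ===== CLAIM (what is proved, stated in full; the proofs are below) =====
def Claim_equal_check_goal_state_satisfied : Prop := ∀ (current_state_status : List (String × List (String × String))) (goal_state_status : List (String × List (String × String))), Dom_check_goal_state_satisfied current_state_status goal_state_status → Pre_check_goal_state_satisfied current_state_status goal_state_status → Spec_check_goal_state_satisfied current_state_status goal_state_status (check_goal_state_satisfied current_state_status goal_state_status)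


-- ===== LEMMAS AND PROOFS =====

lemma pvLoopA_true_iff (cur : PySem.Dict String String) (gs : List (String × String)) :
    pvLoopA cur gs = true ↔ ∀ p ∈ gs, cur.get? p.1 = some p.2 := by
  induction gs with
  | nil => simp [pvLoopA]
  | cons p rest ih =>
    obtain ⟨b, l⟩ := p
    constructor
    · intro h q hq
      rw [pvLoopA] at h
      by_cases hc : cur.contains b = true
      · rw [if_pos hc] at h
        by_cases hg : cur.get? b = some l
        · rw [if_neg (by simp [hg])] at h
          rcases List.mem_cons.mp hq with rfl | hq'
          · exact hg
          · exact (ih.mp h) q hq'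
        · rw [if_pos (by simp [hg])] at h; cases h
      · rw [if_neg hc] at h; cases h
    · intro H
      have hg : cur.get? b = some l := H (b, l) (List.mem_cons_self ..)
      have hc : cur.contains b = true := by
        rw [PySem.Dict.contains_eq_isSome_get?, hg]; rfl
      rw [pvLoopA, if_pos hc, if_neg (by simp [hg])]
      exact ih.mpr (fun q hq => H q (List.mem_cons_of_mem _ hq))

lemma foldl_insert_get?_not_mem (gs : List (String × String)) (d : PySem.Dict String String)
    (k : String) (hk : k ∉ gs.map Prod.fst) :
    (gs.foldl (fun d p => d.insert p.1 p.2) d).get? k = d.get? k := by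
  induction gs generalizing d with
  | nil => rfl
  | cons p rest ih =>
    simp only [List.map_cons, List.mem_cons, not_or] at hk
    simp only [List.foldl_cons]
    rw [ih _ hk.2, PySem.Dict.get?_insert_of_ne _ _ hk.1]

lemma foldl_insert_get?_mem (gs : List (String × String)) (d : PySem.Dict String String)
    (hnd : (gs.map Prod.fst).Nodup) (k : String) (v : String) (hkv : (k, v) ∈ gs) :
    (gs.foldl (fun d p => d.insert p.1 p.2) d).get? k = some v := by
  induction gs generalizing d with
  | nil => cases hkv
  | cons p rest ih =>
    simp only [List.map_cons, List.nodup_cons] at hnd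
    simp only [List.foldl_cons]
    rcases List.mem_cons.mp hkv with h | h
    · cases h
      have : k ∉ rest.map Prod.fst := hnd.1
      rw [foldl_insert_get?_not_mem _ _ _ this, PySem.Dict.get?_insert_self]
    · exact ih _ hnd.2 h

lemma main_eq (cur : PySem.Dict String String) (goal : PySem.Dict String String)
    (hndc : cur.keys.Nodup) (hndg : goal.keys.Nodup) :
    pvLoopA cur goal.items =
      pyDictEq (goal.items.foldl (fun d p => d.insert p.1 p.2) cur) cur := by
  set gs := goal.items with hgs
  have hndgs : (gs.map Prod.fst).Nodup := hndg
  set M := gs.foldl (fun d p => d.insert p.1 p.2) cur with hM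
  have hndM : M.keys.Nodup :=
    PySem.Dict.nodup_keys_foldl_insert_key gs Prod.fst (fun _ p => p.2) cur hndc
  rw [Bool.eq_iff_iff, pvLoopA_true_iff]
  constructor
  · intro H
    -- every lookup agrees between M and cur
    have hpt : ∀ k, M.get? k = cur.get? k := by
      intro k
      by_cases hk : k ∈ gs.map Prod.fst
      · obtain ⟨⟨k', v⟩, hmem, hfst⟩ := List.mem_map.mp hk
        cases hfst
        rw [foldl_insert_get?_mem gs cur hndgs _ _ hmem, H _ hmem]
      · exact foldl_insert_get?_not_mem gs cur k hk
    unfold pyDictEq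
    rw [Bool.and_eq_true, List.all_eq_true, List.all_eq_true]
    constructor
    · intro p hp
      have : M.get? p.1 = some p.2 := PySem.Dict.get?_of_mem_items M hp hndM
      rw [← hpt p.1, this]; simp
    · intro p hp
      have : cur.get? p.1 = some p.2 := PySem.Dict.get?_of_mem_items cur hp hndc
      rw [hpt p.1, this]; simp
  · intro H p hp
    rw [pyDictEq, Bool.and_eq_true, List.all_eq_true, List.all_eq_true] at H
    have hMp : M.get? p.1 = some p.2 := foldl_insert_get?_mem gs cur hndgs _ _ hp
    have hitem : (p.1, p.2) ∈ M.items := PySem.Dict.mem_items_of_get?_eq_some M hMp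
    have := H.1 _ hitem
    simpa using this

theorem check_goal_state_satisfied_spec : Claim_equal_check_goal_state_satisfied := by
  intro c g _ _
  unfold Spec_check_goal_state_satisfied check_goal_state_satisfied check_goal_state_satisfied_alt
  exact main_eq _ _ (PySem.Dict.nodup_keys_ofList _) (PySem.Dict.nodup_keys_ofList _)
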